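-- pv_equiv track=rewrite | github.com/beacuevas/breathing_analysis_public | wav/wav_signal_processing.py | temporal_consistency_check
-- ===== SOURCE A (Python) =====
-- def temporal_consistency_check(filtered_laser_events, containing_breath_cycles_for_laser_events):
--     """
--     Check if the laser events and breath cycles are in ascending order.
--
--     Parameters:
--     - filtered_laser_events (list): List of tuples containing the start and end indices of each laser event.
--     - containing_breath_cycles_for_laser_events (list): List of tuples containing the start and end indices of the breath cycle for each laser event.
--
--     Returns:
--     - bool: True if all checks passed, False otherwise.
--     - str: Message indicating the result.
--     """
--
--     last_event_start = -1
--     last_cycle_start = -1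
--
--     for (event_start, _), (cycle_start, _) in zip(filtered_laser_events, containing_breath_cycles_for_laser_events):
--         if event_start <= last_event_start or cycle_start <= last_cycle_start:
--             return False, "Events or cycles are not in ascending order."
--         last_event_start = event_start
--         last_cycle_start = cycle_start
--
--     return True, "All checks passed."
-- ===== SOURCE B (Python) =====
-- def temporal_consistency_check(filtered_laser_events, containing_breath_cycles_for_laser_events):
--     pairs = list(zip(filtered_laser_events, containing_breath_cycles_for_laser_events))
--     event_starts = [event[0] for event, _ in pairs]
--     cycle_starts = [cycle[0] for _, cycle in pairs]
--
--     def ascending(starts):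
--         return all(prev < cur for prev, cur in zip([-1] + starts, starts))
--
--     if ascending(event_starts) and ascending(cycle_starts):
--         return True, "All checks passed."
--     return False, "Events or cycles are not in ascending order."
-- ===== Notes on version B (the rewrite author's own statement) =====
-- stated objective: alternative
-- what changed: Replaces the single fused loop carrying two running 'last start' variables by materialising the two start lists and checking each independently for strict ascent against a prepended -1 sentinel.
import Mathlib
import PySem

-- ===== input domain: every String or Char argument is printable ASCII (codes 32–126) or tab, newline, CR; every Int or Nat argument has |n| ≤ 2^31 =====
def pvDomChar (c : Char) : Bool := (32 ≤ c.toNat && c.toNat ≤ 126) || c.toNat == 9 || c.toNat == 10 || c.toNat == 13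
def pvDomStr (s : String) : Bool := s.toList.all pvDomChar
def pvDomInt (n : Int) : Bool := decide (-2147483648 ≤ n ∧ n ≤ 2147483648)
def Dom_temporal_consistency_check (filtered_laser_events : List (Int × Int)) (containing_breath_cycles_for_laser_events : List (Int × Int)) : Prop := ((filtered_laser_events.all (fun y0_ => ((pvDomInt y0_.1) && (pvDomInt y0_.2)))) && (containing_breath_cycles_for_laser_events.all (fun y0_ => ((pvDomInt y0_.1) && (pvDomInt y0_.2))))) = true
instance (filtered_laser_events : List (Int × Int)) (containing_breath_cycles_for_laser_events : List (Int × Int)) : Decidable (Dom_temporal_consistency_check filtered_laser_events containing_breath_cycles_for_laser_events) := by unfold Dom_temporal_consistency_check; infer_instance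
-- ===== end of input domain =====

-- B replaces A's fused loop with two running 'last' variables by building the two
-- start lists from the zipped pairs and checking each independently for strict
-- ascent against a prepended -1 sentinel (alternative decomposition, same cost).


-- ===== PORT A =====
-- A's for-loop over zip with early return, carrying last_event_start / last_cycle_start.
def tccLoopA : List ((Int × Int) × (Int × Int)) → Int → Int → Bool × String
  | [], _, _ => (true, "All checks passed.")
  | ((event_start, _), (cycle_start, _)) :: rest, last_event_start, last_cycle_start =>
    if event_start ≤ last_event_start || cycle_start ≤ last_cycle_start then
      (false, "Events or cycles are not in ascending order.")
    else
      tccLoopA rest event_start cycle_start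

def temporal_consistency_check (filtered_laser_events : List (Int × Int)) (containing_breath_cycles_for_laser_events : List (Int × Int)) : Bool × String :=
  tccLoopA (filtered_laser_events.zip containing_breath_cycles_for_laser_events) (-1) (-1)

-- ===== PORT B =====
-- all(prev < cur for prev, cur in zip([-1] + starts, starts))
def tccAscending (starts : List Int) : Bool :=
  ((((-1 : Int) :: starts).zip starts).all (fun p => decide (p.1 < p.2)))

def temporal_consistency_check_alt (filtered_laser_events : List (Int × Int)) (containing_breath_cycles_for_laser_events : List (Int × Int)) : Bool × String :=
  let pairs := filtered_laser_events.zip containing_breath_cycles_for_laser_events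
  let event_starts := pairs.map (fun p => p.1.1)
  let cycle_starts := pairs.map (fun p => p.2.1)
  if tccAscending event_starts && tccAscending cycle_starts then
    (true, "All checks passed.")
  else
    (false, "Events or cycles are not in ascending order.")

-- ===== PRECONDITION & SPEC =====
def Spec_temporal_consistency_check (filtered_laser_events : List (Int × Int)) (containing_breath_cycles_for_laser_events : List (Int × Int)) (out : Bool × String) : Prop := out = temporal_consistency_check_alt filtered_laser_events containing_breath_cycles_for_laser_events
instance (filtered_laser_events : List (Int × Int)) (containing_breath_cycles_for_laser_events : List (Int × Int)) (out : Bool × String) : Decidable (Spec_temporal_consistency_check filtered_laser_events containing_breath_cycles_for_laser_events out) := by unfold Spec_temporal_consistency_check; infer_instance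

-- ===== CLAIM (what is proved, stated in full; the proofs are below) =====
def Claim_equal_temporal_consistency_check : Prop := ∀ (filtered_laser_events : List (Int × Int)) (containing_breath_cycles_for_laser_events : List (Int × Int)), Dom_temporal_consistency_check filtered_laser_events containing_breath_cycles_for_laser_events → Spec_temporal_consistency_check filtered_laser_events containing_breath_cycles_for_laser_events (temporal_consistency_check filtered_laser_events containing_breath_cycles_for_laser_events)

-- ===== LEMMAS AND PROOFS =====

-- 'ascending from sentinel x' as a recursive predicate
def tccAscFrom (x : Int) : List Int → Bool
  | [] => true
  | y :: ys => decide (x < y) && tccAscFrom y ys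

theorem tccAscending_eq_ascFrom (x : Int) (ys : List Int) :
    ((x :: ys).zip ys).all (fun p => decide (p.1 < p.2)) = tccAscFrom x ys := by
  induction ys generalizing x with
  | nil => rfl
  | cons y ys ih =>
    simp [tccAscFrom, List.zip, ← ih y, List.all_cons]

theorem tccLoopA_eq (l : List ((Int × Int) × (Int × Int))) (le lc : Int) :
    tccLoopA l le lc =
      (if tccAscFrom le (l.map (fun p => p.1.1)) && tccAscFrom lc (l.map (fun p => p.2.1)) then
        (true, "All checks passed.")
      else
        (false, "Events or cycles are not in ascending order.")) := by
  induction l generalizing le lc with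
  | nil => rfl
  | cons hd tl ih =>
    obtain ⟨⟨es, ee⟩, ⟨cs, ce⟩⟩ := hd
    simp only [tccLoopA, List.map_cons, tccAscFrom, ih]
    by_cases h1 : es ≤ le <;> by_cases h2 : cs ≤ lc <;>
      simp_all [decide_eq_true_eq, not_le]

-- ===== VERDICT (by name: the statement is the Claim_ definition above) =====
theorem temporal_consistency_check_spec : Claim_equal_temporal_consistency_check := by
  intro a b _
  unfold Spec_temporal_consistency_check temporal_consistency_check temporal_consistency_check_alt
  simp only [tccLoopA_eq, tccAscending, tccAscending_eq_ascFrom]
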